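-- pv_equiv track=rewrite | github.com/TelevisionNinja/Denoising-Diffusion-Probabilistic-Model | src/main.py | filter_file_paths_includes
-- ===== SOURCE A (Python) =====
-- def filter_file_paths_includes(file_list, string_list):
--     filtered = []
--
--     for file_name in file_list:
--         for string in string_list:
--             if string in str(file_name):
--                 filtered.append(file_name)
--                 break
--
--     return filtered
-- ===== SOURCE B (Python) =====
-- def filter_file_paths_includes(file_list, string_list):
--     matched = set()
--     remaining = list(enumerate(file_list))
--     for string in string_list:
--         still = []
--         for i, file_name in remaining:
--             if string in str(file_name):
--                 matched.add(i)
--             else: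
--                 still.append((i, file_name))
--         remaining = still
--     return [file_name for i, file_name in enumerate(file_list) if i in matched]
-- ===== Notes on version B (the rewrite author's own statement) =====
-- stated objective: alternative
-- what changed: Pattern-major progressive elimination: B scans the still-unmatched files once per pattern, partitioning them into a matched index set and a remaining list, then reconstructs the kept files in original order, instead of A's file-major inner loop over patterns with break.
import Mathlib
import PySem

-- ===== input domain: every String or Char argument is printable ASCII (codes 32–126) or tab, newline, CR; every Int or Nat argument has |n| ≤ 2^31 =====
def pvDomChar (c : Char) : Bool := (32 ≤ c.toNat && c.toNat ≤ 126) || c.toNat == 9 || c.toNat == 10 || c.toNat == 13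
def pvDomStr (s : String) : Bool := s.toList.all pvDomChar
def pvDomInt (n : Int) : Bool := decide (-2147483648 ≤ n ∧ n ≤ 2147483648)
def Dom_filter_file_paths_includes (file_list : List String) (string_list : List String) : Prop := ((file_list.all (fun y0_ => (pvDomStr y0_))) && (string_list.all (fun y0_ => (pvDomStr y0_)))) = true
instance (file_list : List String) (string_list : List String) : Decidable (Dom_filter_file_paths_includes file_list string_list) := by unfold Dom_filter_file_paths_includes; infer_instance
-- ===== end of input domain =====

-- B is an alternative re-implementation: pattern-major progressive elimination — for each
-- pattern it partitions the still-unmatched files, collecting matched indices in a set,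
-- then rebuilds the kept files in original order; A is file-major with an inner break.

-- ===== PORT A =====
-- inner 'for string in string_list: if string in file_name: append; break'
def pvAInner (file_name : String) (filtered : List String) : List String → List String
  | [] => filtered
  | s :: rest =>
    if PySem.Str.isIn s file_name then filtered ++ [file_name]
    else pvAInner file_name filtered rest

def filter_file_paths_includes (file_list : List String) (string_list : List String) : List String :=
  file_list.foldl (fun filtered file_name => pvAInner file_name filtered string_list) []

-- ===== PORT B =====
def filter_file_paths_includes_alt (file_list : List String) (string_list : List String) : List String :=
  let res : List (Int × String) × PySem.Set Int :=
    string_list.foldl (fun acc s =>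
      acc.1.foldl (fun (acc2 : List (Int × String) × PySem.Set Int) p =>
        if PySem.Str.isIn s p.2 then (acc2.1, PySem.Set.add acc2.2 p.1)
        else (acc2.1 ++ [p], acc2.2)) ([], acc.2))
      (PySem.List.enumerate file_list, PySem.Set.empty)
  ((PySem.List.enumerate file_list).filter (fun p => PySem.Set.contains res.2 p.1)).map (fun x => x.2)

-- ===== PRECONDITION & SPEC =====
def Spec_filter_file_paths_includes (file_list : List String) (string_list : List String) (out : List String) : Prop := out = filter_file_paths_includes_alt file_list string_list
instance (file_list : List String) (string_list : List String) (out : List String) : Decidable (Spec_filter_file_paths_includes file_list string_list out) := by unfold Spec_filter_file_paths_includes; infer_instance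

-- ===== CLAIM (what is proved, stated in full; the proofs are below) =====
def Claim_equal_filter_file_paths_includes : Prop := ∀ (file_list : List String) (string_list : List String), Dom_filter_file_paths_includes file_list string_list → Spec_filter_file_paths_includes file_list string_list (filter_file_paths_includes file_list string_list)

-- ===== LEMMAS AND PROOFS =====

-- A's inner loop keeps the file iff some pattern is a substring.
theorem pvAInner_eq (file_name : String) (filtered : List String) (sl : List String) :
    pvAInner file_name filtered sl =
      if sl.any (fun s => PySem.Str.isIn s file_name) then filtered ++ [file_name] else filtered := by
  induction sl with
  | nil => simp [pvAInner]
  | cons s rest ih =>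
    simp only [pvAInner, ih, List.any_cons, Bool.or_eq_true]
    split_ifs <;> tauto

-- A computes the filter of file_list by "some pattern matches".
theorem pvA_eq_filter (file_list string_list : List String) :
    filter_file_paths_includes file_list string_list =
      file_list.filter (fun f => string_list.any (fun s => PySem.Str.isIn s f)) := by
  unfold filter_file_paths_includes
  rw [PySem.List.foldl_congr_mem file_list _
      (fun acc f => if string_list.any (fun s => PySem.Str.isIn s f) then acc ++ [f] else acc) []
      (fun acc f _ => pvAInner_eq f acc string_list)]
  simpa using PySem.List.foldl_append_if_eq_filter
    (fun f => string_list.any (fun s => PySem.Str.isIn s f)) file_list []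

-- B's inner loop (over one pattern, condition c): the "still" list is the non-matching remainder.
theorem pvB_inner_fst (c : Int × String → Bool) (rem : List (Int × String))
    (st : List (Int × String)) (m : PySem.Set Int) :
    (rem.foldl (fun (acc2 : List (Int × String) × PySem.Set Int) p =>
        if c p then (acc2.1, PySem.Set.add acc2.2 p.1)
        else (acc2.1 ++ [p], acc2.2)) (st, m)).1 =
      st ++ rem.filter (fun p => !c p) := by
  induction rem generalizing st m with
  | nil => simp
  | cons q rest ih =>
    simp only [List.foldl_cons, List.filter_cons]
    cases c q <;> simp [ih]

-- B's inner loop: membership in the matched set after one pattern.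
theorem pvB_inner_mem (c : Int × String → Bool) (rem : List (Int × String))
    (st : List (Int × String)) (m : PySem.Set Int) (i : Int) :
    (i ∈ (rem.foldl (fun (acc2 : List (Int × String) × PySem.Set Int) p =>
        if c p then (acc2.1, PySem.Set.add acc2.2 p.1)
        else (acc2.1 ++ [p], acc2.2)) (st, m)).2) ↔
      i ∈ m ∨ ∃ p ∈ rem, c p = true ∧ p.1 = i := by
  induction rem generalizing st m with
  | nil => simp
  | cons q rest ih =>
    simp only [List.foldl_cons, List.mem_cons]
    cases h : c q
    · rw [if_neg (h ▸ Bool.false_ne_true), ih]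
      constructor
      · rintro (hm | ⟨p, hp, hs, hi⟩)
        · exact Or.inl hm
        · exact Or.inr ⟨p, Or.inr hp, hs, hi⟩
      · rintro (hm | ⟨p, (hp | hp), hs, hi⟩)
        · exact Or.inl hm
        · exact absurd (hp ▸ hs) (by simp [h])
        · exact Or.inr ⟨p, hp, hs, hi⟩
    · rw [if_pos rfl, ih]
      simp only [PySem.Set.mem_add]
      constructor
      · rintro ((hm | he) | ⟨p, hp, hs, hi⟩)
        · exact Or.inl hm
        · exact Or.inr ⟨q, Or.inl rfl, h, he.symm⟩
        · exact Or.inr ⟨p, Or.inr hp, hs, hi⟩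
      · rintro (hm | ⟨p, (hp | hp), hs, hi⟩)
        · exact Or.inl (Or.inl hm)
        · exact Or.inl (Or.inr (hp ▸ hi.symm))
        · exact Or.inr ⟨p, hp, hs, hi⟩

-- B's outer loop: membership in the matched set after all patterns.
theorem pvB_outer_mem (c : String → Int × String → Bool) (sl : List String)
    (rem : List (Int × String)) (m : PySem.Set Int) (i : Int) :
    (i ∈ (sl.foldl (fun acc s =>
        acc.1.foldl (fun (acc2 : List (Int × String) × PySem.Set Int) p =>
          if c s p then (acc2.1, PySem.Set.add acc2.2 p.1)
          else (acc2.1 ++ [p], acc2.2)) ([], acc.2)) (rem, m)).2) ↔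
      i ∈ m ∨ ∃ p ∈ rem, (∃ s ∈ sl, c s p = true) ∧ p.1 = i := by
  induction sl generalizing rem m with
  | nil => simp
  | cons s rest ih =>
    simp only [List.foldl_cons, List.mem_cons]
    rw [show (rem.foldl (fun (acc2 : List (Int × String) × PySem.Set Int) p =>
          if c s p then (acc2.1, PySem.Set.add acc2.2 p.1)
          else (acc2.1 ++ [p], acc2.2)) ([], m)) =
        (rem.filter (fun p => !c s p),
         (rem.foldl (fun (acc2 : List (Int × String) × PySem.Set Int) p =>
          if c s p then (acc2.1, PySem.Set.add acc2.2 p.1)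
          else (acc2.1 ++ [p], acc2.2)) ([], m)).2) from
      Prod.ext (by simpa using pvB_inner_fst (c s) rem [] m) rfl]
    rw [ih, pvB_inner_mem]
    constructor
    · rintro ((hm | ⟨p, hp, hs, hi⟩) | ⟨p, hp, ⟨t, ht, hs⟩, hi⟩)
      · exact Or.inl hm
      · exact Or.inr ⟨p, hp, ⟨s, Or.inl rfl, hs⟩, hi⟩
      · exact Or.inr ⟨p, (List.mem_filter.1 hp).1, ⟨t, Or.inr ht, hs⟩, hi⟩
    · rintro (hm | ⟨p, hp, ⟨t, (ht | ht), hs⟩, hi⟩)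
      · exact Or.inl (Or.inl hm)
      · exact Or.inl (Or.inr ⟨p, hp, ht ▸ hs, hi⟩)
      · cases hps : c s p
        · exact Or.inr ⟨p, List.mem_filter.2 ⟨hp, by simp [hps]⟩, ⟨t, ht, hs⟩, hi⟩
        · exact Or.inl (Or.inr ⟨p, hp, hps, hi⟩)

-- Filtering the enumeration by a property of the element and projecting is List.filter.
theorem pvFilter_enumerate_map (q : String → Bool) (fl : List String) (st : Int) :
    ((PySem.List.enumerate fl st).filter (fun p => q p.2)).map (fun x => x.2) = fl.filter q := by
  induction fl generalizing st with
  | nil => simp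
  | cons x xs ih =>
    rw [PySem.List.enumerate_cons]
    by_cases h : q x = true <;> simp [h, ih]

theorem pvB_eq_filter (file_list string_list : List String) :
    filter_file_paths_includes_alt file_list string_list =
      file_list.filter (fun f => string_list.any (fun s => PySem.Str.isIn s f)) := by
  simp only [filter_file_paths_includes_alt]
  rw [List.filter_congr (q := fun p : Int × String =>
        string_list.any (fun s => PySem.Str.isIn s p.2)) ?_]
  · exact pvFilter_enumerate_map (fun f => string_list.any (fun s => PySem.Str.isIn s f)) file_list 0
  intro p hp
  rcases (PySem.List.mem_enumerate_iff _ _ _).1 hp with ⟨k, hk, rfl⟩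
  rw [Bool.eq_iff_iff, PySem.Set.contains_iff,
    pvB_outer_mem (fun s p => PySem.Str.isIn s p.2) string_list, List.any_eq_true]
  constructor
  · rintro (hm | ⟨p', hp', ⟨s, hs, hmatch⟩, hi⟩)
    · simp [PySem.Set.empty] at hm
    · rcases (PySem.List.mem_enumerate_iff _ _ _).1 hp' with ⟨k', hk', rfl⟩
      have hkk : k' = k := by
        have : (0 : Int) + k' = 0 + k := hi
        omega
      subst hkk
      exact ⟨s, hs, hmatch⟩
  · rintro ⟨s, hs, hmatch⟩
    exact Or.inr ⟨((0 : Int) + (k : Int), file_list[k]), hp, ⟨s, hs, hmatch⟩, rfl⟩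

-- ===== VERDICT (by name: the statement is the Claim_ definition above) =====
theorem filter_file_paths_includes_spec : Claim_equal_filter_file_paths_includes := by
  intro file_list string_list _
  unfold Spec_filter_file_paths_includes
  rw [pvA_eq_filter, pvB_eq_filter]
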